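-- pv_equiv track=rewrite | github.com/JoelGotsch/ragpill | src/ragpill/csv/testset.py | _find_common_tags_and_attributes
-- ===== SOURCE A (Python) =====
-- from typing import Any
--
-- def _find_common_tags_and_attributes(
--     all_row_tags: list[set[str]], all_row_attributes: list[dict[str, Any]]
-- ) -> tuple[set[str], dict[str, Any]]:
--     """Find tags and attributes common to all rows.
--
--     Args:
--         all_row_tags: List of tag sets from each row
--         all_row_attributes: List of attribute dicts from each row
--
--     Returns:
--         Tuple of (common_tags, common_attributes)
--     """
--     # Find common tags (present in ALL rows)
--     case_tags: set[str] = all_row_tags[0].intersection(*all_row_tags[1:]) if all_row_tags else set()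
--
--     # Find common attributes (same key-value in ALL rows)
--     case_attributes: dict[str, Any] = {}
--     if all_row_attributes:
--         # Start with first row's attributes
--         potential_common = all_row_attributes[0].copy()
--         # Check if each key-value pair exists in all other rows
--         for attr_dict in all_row_attributes[1:]:
--             keys_to_remove: list[str] = []
--             for key, value in potential_common.items():
--                 if key not in attr_dict or attr_dict[key] != value:
--                     keys_to_remove.append(key)
--             for key in keys_to_remove:
--                 del potential_common[key]
--         case_attributes = potential_common
--
--     return case_tags, case_attributes
-- ===== SOURCE B (Python) =====
-- def _find_common_tags_and_attributes(all_row_tags, all_row_attributes):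
--     """Counting approach: aggregate occurrence counts over all rows in one pass,
--     then an element/pair of the first row is common iff its count equals the
--     number of rows (each row contributes at most one occurrence, since rows
--     are sets / dicts)."""
--     n = len(all_row_tags)
--     tag_counts = {}
--     for row in all_row_tags:
--         for t in row:
--             tag_counts[t] = tag_counts.get(t, 0) + 1
--     case_tags = {t for t in all_row_tags[0] if tag_counts[t] == n} if all_row_tags else set()
--
--     m = len(all_row_attributes)
--     pair_counts = {}
--     for row in all_row_attributes:
--         for kv in row.items():
--             pair_counts[kv] = pair_counts.get(kv, 0) + 1
--     case_attributes = ({k: v for k, v in all_row_attributes[0].items()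
--                         if pair_counts[(k, v)] == m}
--                        if all_row_attributes else {})
--     return case_tags, case_attributes
-- ===== Notes on version B (the rewrite author's own statement) =====
-- stated objective: alternative
-- what changed: Replaces A's row-by-row pruning of a mutable shrinking dict (collect keys_to_remove, delete them, repeat per row) with a counting algorithm: one aggregation pass builds occurrence counters over all rows, then each tag / (key,value) pair of the first row is kept iff its count equals the number of rows; no per-element scan of the other rows and no shrinking accumulator.
import Mathlib
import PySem

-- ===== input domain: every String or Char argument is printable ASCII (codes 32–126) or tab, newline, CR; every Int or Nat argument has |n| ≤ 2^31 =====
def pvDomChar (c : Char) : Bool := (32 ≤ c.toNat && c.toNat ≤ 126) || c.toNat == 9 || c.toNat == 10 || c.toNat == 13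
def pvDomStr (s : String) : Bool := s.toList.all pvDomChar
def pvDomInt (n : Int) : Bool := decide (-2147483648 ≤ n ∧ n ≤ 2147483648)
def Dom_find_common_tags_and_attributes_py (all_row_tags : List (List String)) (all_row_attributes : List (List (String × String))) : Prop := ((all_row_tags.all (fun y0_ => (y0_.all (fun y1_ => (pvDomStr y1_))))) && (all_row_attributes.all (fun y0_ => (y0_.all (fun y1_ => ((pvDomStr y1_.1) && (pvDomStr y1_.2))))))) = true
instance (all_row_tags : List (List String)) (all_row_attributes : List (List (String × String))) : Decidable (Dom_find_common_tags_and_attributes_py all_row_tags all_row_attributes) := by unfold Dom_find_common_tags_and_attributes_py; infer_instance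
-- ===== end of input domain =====

-- B replaces A's row-by-row pruning of a mutable shrinking dict with a counting algorithm:
-- one aggregation pass builds occurrence counters over all rows, then a first-row element /
-- pair is common iff its count equals the number of rows (objective: alternative).
-- Output encoding: the tag component a Python set (distinct list), the attribute component a
-- dict (association list in insertion order).

-- ===== PORT A =====
-- A's row step: collect keys_to_remove, then del each collected key from the dict.
def pvARemoveStep (pc : List (String × String)) (d : List (String × String)) : List (String × String) :=
  let keysToRemove : List String :=
    (pc.filter (fun kv => !((PySem.Dict.mk d).get? kv.1 == some kv.2))).map (·.1)
  keysToRemove.foldl (fun pc' k => pc'.filter (fun kv => kv.1 != k)) pc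

def find_common_tags_and_attributes_py (all_row_tags : List (List String)) (all_row_attributes : List (List (String × String))) : List String × (List (String × String)) :=
  let case_tags : List String :=
    match all_row_tags with
    | [] => []
    | first :: rest => rest.foldl (fun acc s => acc.filter (fun t => s.contains t)) first
  let case_attributes : List (String × String) :=
    match all_row_attributes with
    | [] => []
    | first :: rest => rest.foldl pvARemoveStep first
  (case_tags, case_attributes)

-- ===== PORT B =====
-- counts[x] = counts.get(x, 0) + 1, over every element of every row
def pvCounterRows {α : Type} [BEq α] (rows : List (List α)) : PySem.Dict α Int :=
  rows.foldl (fun d row => row.foldl (fun d x => d.insert x (d.getD x 0 + 1)) d) PySem.Dict.empty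

def find_common_tags_and_attributes_py_alt (all_row_tags : List (List String)) (all_row_attributes : List (List (String × String))) : List String × (List (String × String)) :=
  let n : Int := all_row_tags.length
  let tag_counts := pvCounterRows all_row_tags
  let case_tags : List String :=
    match all_row_tags with
    | [] => []
    -- tag_counts[t]: exact as getD — every t of the first row is a key of the counter
    | first :: _ => first.filter (fun t => tag_counts.getD t 0 == n)
  let m : Int := all_row_attributes.length
  let pair_counts := pvCounterRows all_row_attributes
  let case_attributes : List (String × String) :=
    match all_row_attributes with
    | [] => []
    -- pair_counts[(k, v)]: exact as getD — every pair of the first row is a key of the counter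
    | first :: _ => first.filter (fun kv => pair_counts.getD kv 0 == m)
  (case_tags, case_attributes)

-- ===== PRECONDITION & SPEC =====
-- Pre_ requires each tag row to be duplicate-free and each attribute row to have pairwise-
-- distinct keys: the rows encode Python sets resp. dicts, which cannot carry duplicates, so
-- no excluded list corresponds to an input the Python function ever receives.
def Pre_find_common_tags_and_attributes_py (all_row_tags : List (List String)) (all_row_attributes : List (List (String × String))) : Prop :=
  (∀ r ∈ all_row_tags, r.Nodup) ∧ (∀ d ∈ all_row_attributes, (d.map Prod.fst).Nodup)
instance (all_row_tags : List (List String)) (all_row_attributes : List (List (String × String))) : Decidable (Pre_find_common_tags_and_attributes_py all_row_tags all_row_attributes) := by unfold Pre_find_common_tags_and_attributes_py; infer_instance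

def pvWitness_find_common_tags_and_attributes_py : List (List String) × (List (List (String × String))) :=
  ([["a", "b"], ["b"]], [[("x", "1"), ("y", "2")], [("x", "1")]])

def Spec_find_common_tags_and_attributes_py (all_row_tags : List (List String)) (all_row_attributes : List (List (String × String))) (out : List String × (List (String × String))) : Prop := out = find_common_tags_and_attributes_py_alt all_row_tags all_row_attributes
instance (all_row_tags : List (List String)) (all_row_attributes : List (List (String × String))) (out : List String × (List (String × String))) : Decidable (Spec_find_common_tags_and_attributes_py all_row_tags all_row_attributes out) := by unfold Spec_find_common_tags_and_attributes_py; infer_instance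

-- ===== CLAIM (what is proved, stated in full; the proofs are below) =====
def Claim_equal_find_common_tags_and_attributes_py : Prop := ∀ (all_row_tags : List (List String)) (all_row_attributes : List (List (String × String))), Dom_find_common_tags_and_attributes_py all_row_tags all_row_attributes → Pre_find_common_tags_and_attributes_py all_row_tags all_row_attributes → Spec_find_common_tags_and_attributes_py all_row_tags all_row_attributes (find_common_tags_and_attributes_py all_row_tags all_row_attributes)

-- ===== LEMMAS AND PROOFS =====

-- Folding a filter over a list of "parameters" = one filter by the conjunction (all).
theorem pv_foldl_filter {α β : Type} (g : β → α → Bool) (K : List β) (acc : List α) :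
    K.foldl (fun acc k => acc.filter (fun x => g k x)) acc
      = acc.filter (fun x => K.all (fun k => g k x)) := by
  induction K generalizing acc with
  | nil => simp
  | cons k K ih =>
      simp only [List.foldl_cons, ih, List.filter_filter, List.all_cons]
      exact List.filter_congr (fun x _ => by simp [Bool.and_comm])

-- A's remove-collected-keys step is, on a dict with distinct keys, a single filter.
theorem pvARemoveStep_eq_filter (pc d : List (String × String))
    (hnd : (pc.map Prod.fst).Nodup) :
    pvARemoveStep pc d
      = pc.filter (fun kv => (PySem.Dict.mk d).get? kv.1 == some kv.2) := by
  unfold pvARemoveStep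
  rw [pv_foldl_filter]
  refine List.filter_congr (fun kv hkv => ?_)
  rw [Bool.eq_iff_iff]
  simp only [List.all_eq_true, List.mem_map, List.mem_filter, bne_iff_ne, ne_eq,
    Bool.not_eq_eq_eq_not, Bool.not_true, beq_iff_eq, beq_eq_false_iff_ne]
  constructor
  · intro h
    by_contra hp
    exact h kv.1 ⟨kv, ⟨hkv, by simpa using hp⟩, rfl⟩ rfl
  · rintro hp k ⟨kv', ⟨hmem', hp'⟩, rfl⟩ hkk
    have : kv = kv' := List.inj_on_of_nodup_map hnd hkv hmem' hkk
    subst this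
    simp [hp] at hp'

-- Filtering preserves distinctness of the keys.
theorem pv_nodup_keys_filter (pc : List (String × String)) (p : String × String → Bool)
    (hnd : (pc.map Prod.fst).Nodup) : ((pc.filter p).map Prod.fst).Nodup :=
  hnd.sublist (List.Sublist.map Prod.fst List.filter_sublist)

-- A's whole pruning loop = a single filter by "present in every other row's dict".
theorem pv_attr_loop_eq (rest : List (List (String × String))) (first : List (String × String))
    (hnd : (first.map Prod.fst).Nodup) :
    rest.foldl pvARemoveStep first
      = first.filter (fun kv => rest.all (fun d => (PySem.Dict.mk d).get? kv.1 == some kv.2)) := by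
  induction rest generalizing first with
  | nil => simp
  | cons d rest ih =>
      simp only [List.foldl_cons, List.all_cons]
      rw [pvARemoveStep_eq_filter first d hnd,
          ih _ (pv_nodup_keys_filter first _ hnd), List.filter_filter]
      exact List.filter_congr (fun kv _ => by simp [Bool.and_comm])

-- The nested counting loop reads back the total occurrence count across rows.
theorem pv_counter_getD {α : Type} [BEq α] [LawfulBEq α]
    (rows : List (List α)) (x : α) :
    (pvCounterRows rows).getD x 0 = (((rows.map (fun r => r.count x)).sum : Nat) : Int) := by
  suffices h : ∀ d : PySem.Dict α Int,
      (rows.foldl (fun d row => row.foldl (fun d x => d.insert x (d.getD x 0 + 1)) d) d).getD x 0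
        = d.getD x 0 + (((rows.map (fun r => r.count x)).sum : Nat) : Int) by
    simpa [pvCounterRows] using h PySem.Dict.empty
  induction rows with
  | nil => intro d; simp
  | cons r rows ih =>
      intro d
      simp only [List.foldl_cons, List.map_cons, List.sum_cons, ih,
        PySem.Dict.getD_foldl_insert_add_one]
      push_cast
      ring

-- sum of per-row counts is at most the number of rows when each count is ≤ 1 …
theorem pv_sum_le {α : Type} [BEq α] (rows : List (List α)) (x : α)
    (h : ∀ r ∈ rows, r.count x ≤ 1) :
    (rows.map (fun r => r.count x)).sum ≤ rows.length := by
  induction rows with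
  | nil => simp
  | cons r rows ih =>
      have h1 := h r List.mem_cons_self
      have h2 := ih (fun r hr => h r (List.mem_cons_of_mem _ hr))
      simp only [List.map_cons, List.sum_cons, List.length_cons]
      omega

-- … and it hits the number of rows exactly when the element occurs in every row.
theorem pv_sum_eq_length_iff {α : Type} [BEq α] [LawfulBEq α] (rows : List (List α)) (x : α)
    (h : ∀ r ∈ rows, r.count x ≤ 1) :
    ((rows.map (fun r => r.count x)).sum = rows.length ↔ ∀ r ∈ rows, x ∈ r) := by
  induction rows with
  | nil => simp
  | cons r rows ih =>
      have h1 := h r List.mem_cons_self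
      have h2 : ∀ r' ∈ rows, r'.count x ≤ 1 := fun r' hr => h r' (List.mem_cons_of_mem _ hr)
      have hle := pv_sum_le rows x h2
      have hiff := ih h2
      have hcnt := List.count_pos_iff (a := x) (l := r)
      simp only [List.map_cons, List.sum_cons, List.length_cons, List.forall_mem_cons]
      constructor
      · intro he
        exact ⟨hcnt.mp (by omega), hiff.mp (by omega)⟩
      · rintro ⟨hx, hall⟩
        have hs := hiff.mpr hall
        have hc := hcnt.mpr hx
        omega

-- A row with pairwise-distinct keys contains any given pair at most once.
theorem pv_count_pair_le (r : List (String × String))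
    (hnd : (r.map Prod.fst).Nodup) (kv : String × String) : r.count kv ≤ 1 := by
  have hmono : r.countP (· == kv) ≤ r.countP (fun p => p.1 == kv.1) :=
    List.countP_mono_left (fun p _ hp => by
      have : p = kv := by simpa using hp
      simp [this])
  have hmap : (r.map Prod.fst).count kv.1 = r.countP (fun p => p.1 == kv.1) := by
    simp [List.count, List.countP_map, Function.comp_def]
  have hle : (r.map Prod.fst).count kv.1 ≤ 1 :=
    List.nodup_iff_count_le_one.mp hnd kv.1
  calc r.count kv = r.countP (· == kv) := rfl
    _ ≤ r.countP (fun p => p.1 == kv.1) := hmono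
    _ = (r.map Prod.fst).count kv.1 := hmap.symm
    _ ≤ 1 := hle

-- On a dict with distinct keys, "get? k = some v" is membership of the pair.
theorem pv_get?_mk_eq_some_iff (row : List (String × String))
    (hnd : (row.map Prod.fst).Nodup) (kv : String × String) :
    ((PySem.Dict.mk row).get? kv.1 = some kv.2) ↔ kv ∈ row := by
  have h := PySem.Dict.get?_eq_some_iff_mem_items (d := PySem.Dict.mk row)
    (k := kv.1) (v := kv.2) (by simpa using hnd)
  simpa using h

-- B's count-equals-n test, on an element of the first row, is A's "in every other row" test.
theorem pv_tag_pred_eq (first : List String) (rest : List (List String))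
    (hnd : ∀ r ∈ first :: rest, r.Nodup) (t : String) (ht : t ∈ first) :
    ((pvCounterRows (first :: rest)).getD t 0 == (((first :: rest).length : Nat) : Int))
      = rest.all (fun s => s.contains t) := by
  have hle : ∀ r ∈ first :: rest, r.count t ≤ 1 :=
    fun r hr => List.nodup_iff_count_le_one.mp (hnd r hr) t
  rw [Bool.eq_iff_iff, pv_counter_getD]
  rw [beq_iff_eq, Int.ofNat_inj, pv_sum_eq_length_iff _ _ hle]
  simp only [List.all_eq_true, List.contains_iff_mem, List.forall_mem_cons]
  exact ⟨fun h => h.2, fun h => ⟨ht, h⟩⟩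

theorem pv_attr_pred_eq (first : List (String × String)) (rest : List (List (String × String)))
    (hnd : ∀ d ∈ first :: rest, (d.map Prod.fst).Nodup) (kv : String × String)
    (hkv : kv ∈ first) :
    ((pvCounterRows (first :: rest)).getD kv 0 == (((first :: rest).length : Nat) : Int))
      = rest.all (fun d => (PySem.Dict.mk d).get? kv.1 == some kv.2) := by
  have hle : ∀ r ∈ first :: rest, r.count kv ≤ 1 :=
    fun r hr => pv_count_pair_le r (hnd r hr) kv
  rw [Bool.eq_iff_iff, pv_counter_getD]
  rw [beq_iff_eq, Int.ofNat_inj, pv_sum_eq_length_iff _ _ hle]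
  simp only [List.all_eq_true, List.forall_mem_cons, beq_iff_eq]
  constructor
  · intro h d hd
    exact (pv_get?_mk_eq_some_iff d (hnd d (List.mem_cons_of_mem _ hd)) kv).mpr (h.2 d hd)
  · intro h
    exact ⟨hkv, fun d hd =>
      (pv_get?_mk_eq_some_iff d (hnd d (List.mem_cons_of_mem _ hd)) kv).mp (h d hd)⟩

-- ===== VERDICT (by name: the statement is the Claim_ definition above) =====
theorem find_common_tags_and_attributes_py_spec : Claim_equal_find_common_tags_and_attributes_py := by
  intro tags attrs _hdom hpre
  unfold Spec_find_common_tags_and_attributes_py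
  unfold find_common_tags_and_attributes_py find_common_tags_and_attributes_py_alt
  refine Prod.ext ?_ ?_
  · cases tags with
    | nil => rfl
    | cons first rest =>
        show rest.foldl (fun acc s => acc.filter (fun t => s.contains t)) first
          = first.filter (fun t =>
              (pvCounterRows (first :: rest)).getD t 0 == (((first :: rest).length : Nat) : Int))
        rw [pv_foldl_filter (fun s t => s.contains t) rest first]
        exact List.filter_congr (fun t ht =>
          (pv_tag_pred_eq first rest hpre.1 t ht).symm)
  · cases attrs with
    | nil => rfl
    | cons first rest =>
        show rest.foldl pvARemoveStep first
          = first.filter (fun kv =>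
              (pvCounterRows (first :: rest)).getD kv 0 == (((first :: rest).length : Nat) : Int))
        rw [pv_attr_loop_eq rest first (hpre.2 first List.mem_cons_self)]
        exact List.filter_congr (fun kv hkv =>
          (pv_attr_pred_eq first rest hpre.2 kv hkv).symm)
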